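-- pv_equiv track=rewrite | github.com/AnaClaraZoppiSerpa/diffusion-studies-supporting-codes | diffusion_analysis_code/lat.py | compute_linear_expression
-- ===== SOURCE A (Python) =====
-- def compute_linear_expression(x, mask, bits):
--     xor = 0
--     for s in range(bits):
--         x_s = (x >> s) & 1
--         mask_s = (mask >> s) & 1
--         and_result = x_s & mask_s
--         xor = xor ^ and_result
--     return xor
-- ===== SOURCE B (Python) =====
-- def compute_linear_expression(x, mask, bits):
--     if bits <= 0:
--         return 0
--     low = (x & mask) & ((1 << bits) - 1)
--     return low.bit_count() & 1
-- ===== Notes on version B (the rewrite author's own statement) =====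
-- stated objective: faster
-- what changed: Replaces the per-bit Python loop (shift/mask/xor for each s in range(bits)) by one masked AND plus a single int.bit_count() call whose low bit is the parity.
import Mathlib
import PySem

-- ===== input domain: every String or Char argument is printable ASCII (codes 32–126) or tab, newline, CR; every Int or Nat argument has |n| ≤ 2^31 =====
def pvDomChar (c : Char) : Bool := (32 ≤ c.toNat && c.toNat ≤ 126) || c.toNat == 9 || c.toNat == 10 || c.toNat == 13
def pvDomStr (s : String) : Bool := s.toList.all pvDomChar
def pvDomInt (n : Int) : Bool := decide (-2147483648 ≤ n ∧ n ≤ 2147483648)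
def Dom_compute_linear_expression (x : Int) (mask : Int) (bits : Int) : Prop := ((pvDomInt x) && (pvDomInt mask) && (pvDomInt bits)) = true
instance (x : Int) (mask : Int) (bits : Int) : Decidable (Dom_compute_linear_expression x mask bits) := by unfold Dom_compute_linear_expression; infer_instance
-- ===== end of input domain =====

-- B replaces A's per-bit loop by masking the low `bits` bits of x & mask and taking bit_count() & 1.

-- ===== PORT A =====
def compute_linear_expression (x : Int) (mask : Int) (bits : Int) : Int :=
  (PySem.List.pyRange 0 bits).foldl
    (fun xor s =>
      let x_s := PySem.Int.band (x >>> s.toNat) 1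
      let mask_s := PySem.Int.band (mask >>> s.toNat) 1
      let and_result := PySem.Int.band x_s mask_s
      PySem.Int.bxor xor and_result) 0

-- ===== PORT B =====
-- Hand port of `int.bit_count()` on a nonnegative int (tail-recursive so it evaluates without
-- deep recursion); it is exact there: proved equal to PySem.Int.bitCount in popcountAux_eq below.
def popcountAux (v acc : Nat) : Nat :=
  if v = 0 then acc else popcountAux (v / 2) (acc + v % 2)
decreasing_by exact Nat.div_lt_self (Nat.pos_of_ne_zero (by assumption)) (by norm_num)

def compute_linear_expression_alt (x : Int) (mask : Int) (bits : Int) : Int :=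
  if bits ≤ 0 then 0
  else
    -- low = (x & mask) & ((1 << bits) - 1); it is ≥ 0, so `.toNat` below is exact
    let low := PySem.Int.band (PySem.Int.band x mask) ((1 <<< bits.toNat) - 1)
    PySem.Int.band ((popcountAux low.toNat 0 : Nat) : Int) 1

-- ===== PRECONDITION & SPEC =====
def Spec_compute_linear_expression (x : Int) (mask : Int) (bits : Int) (out : Int) : Prop := out = compute_linear_expression_alt x mask bits
instance (x : Int) (mask : Int) (bits : Int) (out : Int) : Decidable (Spec_compute_linear_expression x mask bits out) := by unfold Spec_compute_linear_expression; infer_instance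

-- ===== CLAIM (what is proved, stated in full; the proofs are below) =====
def Claim_equal_compute_linear_expression : Prop := ∀ (x : Int) (mask : Int) (bits : Int), Dom_compute_linear_expression x mask bits → Spec_compute_linear_expression x mask bits (compute_linear_expression x mask bits)

-- ===== LEMMAS AND PROOFS =====

-- Nat facts: parity and halving of bitwise and/or.
theorem natAndMod2 (a b : Nat) : (a &&& b) % 2 = a % 2 * (b % 2) := by
  rw [← Nat.and_one_is_mod (a &&& b), Nat.and_assoc, Nat.and_one_is_mod b]
  rcases Nat.mod_two_eq_zero_or_one b with hb | hb <;> rw [hb]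
  · simp [Nat.and_zero]
  · rw [Nat.and_one_is_mod]; omega

theorem natOrMod2 (a b : Nat) : (a ||| b) % 2 = a % 2 ||| b % 2 := by
  rw [← Nat.and_one_is_mod (a ||| b), Nat.and_or_distrib_right, Nat.and_one_is_mod, Nat.and_one_is_mod]

-- band on canonical sign forms
theorem bandPP (a b : Nat) : PySem.Int.band (a : Int) (b : Int) = ((a &&& b : Nat) : Int) := by
  simp [PySem.Int.band, Int.toNat_natCast]

theorem bandPN (a n : Nat) : PySem.Int.band (a : Int) (-(n : Int) - 1) = ((a - (a &&& n) : Nat) : Int) := by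
  rw [PySem.Int.band, if_pos (by positivity), if_neg (by omega)]
  rw [show (-(-(n : Int) - 1) - 1) = (n : Int) by ring]
  rw [Int.toNat_natCast, Int.toNat_natCast]

theorem bandNN (m n : Nat) : PySem.Int.band (-(m : Int) - 1) (-(n : Int) - 1) = -((m ||| n : Nat) : Int) - 1 := by
  rw [PySem.Int.band, if_neg (by omega), if_neg (by omega)]
  rw [show (-(-(m : Int) - 1) - 1) = (m : Int) by ring, show (-(-(n : Int) - 1) - 1) = (n : Int) by ring]
  rw [Int.toNat_natCast, Int.toNat_natCast]

-- low bit of band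
theorem int_canon (z : Int) : (∃ a : Nat, z = (a : Int)) ∨ (∃ m : Nat, z = -(m : Int) - 1) := by
  by_cases h : 0 ≤ z
  · exact Or.inl ⟨z.toNat, by omega⟩
  · exact Or.inr ⟨(-z - 1).toNat, by omega⟩

theorem modP (a : Nat) : PySem.Int.mod (a : Int) 2 = ((a % 2 : Nat) : Int) := by
  rw [PySem.Int.mod_eq_emod_of_pos (by norm_num)]; omega

theorem modN (m : Nat) : PySem.Int.mod (-(m : Int) - 1) 2 = 1 - ((m % 2 : Nat) : Int) := by
  rw [PySem.Int.mod_eq_emod_of_pos (by norm_num)]; omega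

theorem divP (a : Nat) : PySem.Int.floordiv (a : Int) 2 = ((a / 2 : Nat) : Int) := by
  rw [PySem.Int.floordiv_eq_ediv_of_pos (by norm_num)]; omega

theorem divN (m : Nat) : PySem.Int.floordiv (-(m : Int) - 1) 2 = -((m / 2 : Nat) : Int) - 1 := by
  rw [PySem.Int.floordiv_eq_ediv_of_pos (by norm_num)]; omega

theorem band_mod_two_PN (a n : Nat) :
    PySem.Int.mod (PySem.Int.band (a : Int) (-(n : Int) - 1)) 2
      = PySem.Int.mod (a : Int) 2 * PySem.Int.mod (-(n : Int) - 1) 2 := by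
  rw [bandPN, modP, modP, modN]
  have hc := natAndMod2 a n
  have hle : a &&& n ≤ a := Nat.and_le_left
  rcases Nat.mod_two_eq_zero_or_one a with h1 | h1 <;>
    rcases Nat.mod_two_eq_zero_or_one n with h2 | h2 <;>
    rw [h1, h2] at hc ⊢ <;> push_cast <;> omega

theorem band_mod_two (x y : Int) :
    PySem.Int.mod (PySem.Int.band x y) 2 = PySem.Int.mod x 2 * PySem.Int.mod y 2 := by
  rcases int_canon x with ⟨a, rfl⟩ | ⟨m, rfl⟩ <;> rcases int_canon y with ⟨b, rfl⟩ | ⟨n, rfl⟩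
  · rw [bandPP, modP, modP, modP, natAndMod2]; push_cast; ring
  · exact band_mod_two_PN a n
  · rw [PySem.Int.band_comm, band_mod_two_PN b m, mul_comm]
  · rw [bandNN, modN, modN, modN]
    have hor := natOrMod2 m n
    rcases Nat.mod_two_eq_zero_or_one m with h1 | h1 <;>
      rcases Nat.mod_two_eq_zero_or_one n with h2 | h2 <;>
      rw [h1, h2] at hor <;>
      simp only [Nat.zero_or, Nat.or_zero, Nat.or_self] at hor <;>
      rw [hor, h1, h2] <;> norm_num

-- halving of band
theorem band_div_two_PN (a n : Nat) :
    PySem.Int.floordiv (PySem.Int.band (a : Int) (-(n : Int) - 1)) 2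
      = PySem.Int.band (PySem.Int.floordiv (a : Int) 2) (PySem.Int.floordiv (-(n : Int) - 1) 2) := by
  rw [bandPN, divP, divP, divN, bandPN, ← Nat.and_div_two]
  have hc := natAndMod2 a n
  have hle : a &&& n ≤ a := Nat.and_le_left
  rw [Nat.cast_inj]
  rcases Nat.mod_two_eq_zero_or_one n with h2 | h2 <;> rw [h2] at hc <;> omega

theorem band_div_two (x y : Int) :
    PySem.Int.floordiv (PySem.Int.band x y) 2 = PySem.Int.band (PySem.Int.floordiv x 2) (PySem.Int.floordiv y 2) := by
  rcases int_canon x with ⟨a, rfl⟩ | ⟨m, rfl⟩ <;> rcases int_canon y with ⟨b, rfl⟩ | ⟨n, rfl⟩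
  · rw [bandPP, divP, divP, divP, bandPP, ← Nat.and_div_two]
  · exact band_div_two_PN a n
  · rw [PySem.Int.band_comm, band_div_two_PN b m, PySem.Int.band_comm]
  · rw [bandNN, divN, divN, divN, bandNN, ← Nat.or_div_two]

theorem mod2_01 (x : Int) : PySem.Int.mod x 2 = 0 ∨ PySem.Int.mod x 2 = 1 := by
  rw [PySem.Int.mod_eq_emod_of_pos (by norm_num)]; omega

theorem band01 (u v : Int) (hu : u = 0 ∨ u = 1) (hv : v = 0 ∨ v = 1) :
    PySem.Int.band u v = u * v := by
  rcases hu with rfl | rfl <;> rcases hv with rfl | rfl <;> decide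

theorem bxor01 (u v : Int) (hu : u = 0 ∨ u = 1) (hv : v = 0 ∨ v = 1) :
    PySem.Int.bxor u v = 0 ∨ PySem.Int.bxor u v = 1 := by
  rcases hu with rfl | rfl <;> rcases hv with rfl | rfl <;> simp [PySem.Int.bxor]

theorem shift_one (z : Int) : z >>> (1 : Nat) = PySem.Int.floordiv z 2 := by
  rw [Int.shiftRight_eq_div_pow, PySem.Int.floordiv_eq_ediv_of_pos (by norm_num)]
  norm_num

theorem shift_succ (z : Int) (k : Nat) : z >>> (k + 1) = (z >>> (1 : Nat)) >>> k := by
  rw [Int.shiftRight_eq_div_pow, Int.shiftRight_eq_div_pow, Int.shiftRight_eq_div_pow]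
  rw [show ((2 ^ (k + 1) : Nat) : Int) = ((2 ^ 1 : Nat) : Int) * ((2 ^ k : Nat) : Int) by push_cast; ring]
  rw [← Int.ediv_ediv_of_nonneg (y := ((2 ^ 1 : Nat) : Int)) (by positivity)]

theorem modMask (n : Nat) : PySem.Int.mod ((2 : Int) ^ (n + 1) - 1) 2 = 1 := by
  rw [PySem.Int.mod_eq_emod_of_pos (by norm_num), pow_succ]
  have h : (0 : Int) < 2 ^ n := by positivity
  omega

theorem divMask (n : Nat) : PySem.Int.floordiv ((2 : Int) ^ (n + 1) - 1) 2 = 2 ^ n - 1 := by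
  rw [PySem.Int.floordiv_eq_ediv_of_pos (by norm_num), pow_succ]
  have h : (0 : Int) < 2 ^ n := by positivity
  omega

theorem bitCount_step {v : Int} (hv : 0 ≤ v) :
    PySem.Int.bitCount v = (PySem.Int.mod v 2).toNat + PySem.Int.bitCount (PySem.Int.floordiv v 2) := by
  rcases eq_or_lt_of_le hv with h | h
  · rw [← h]
    rw [show PySem.Int.mod 0 2 = 0 by rw [PySem.Int.mod_eq_emod_of_pos (by norm_num)]; rfl]
    rw [show PySem.Int.floordiv 0 2 = 0 by rw [PySem.Int.floordiv_eq_ediv_of_pos (by norm_num)]; rfl]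
    simp [PySem.Int.bitCount_zero]
  · exact PySem.Int.bitCount_of_pos h

theorem master (n : Nat) : ∀ (x mask a : Int), (a = 0 ∨ a = 1) →
    (List.range n).foldl
      (fun acc k => PySem.Int.bxor acc
        (PySem.Int.band (PySem.Int.band (x >>> ((k : Nat) : Int)) 1)
          (PySem.Int.band (mask >>> ((k : Nat) : Int)) 1))) a
    = PySem.Int.bxor a
        ((PySem.Int.bitCount (PySem.Int.band (PySem.Int.band x mask) (2 ^ n - 1)) % 2 : Nat) : Int) := by
  induction n with
  | zero =>
    intro x mask a ha
    rw [show ((2 : Int) ^ 0 - 1) = 0 by norm_num, PySem.Int.band_zero, PySem.Int.bitCount_zero]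
    simp [PySem.Int.bxor_zero]
  | succ n ih =>
    intro x mask a ha
    rw [List.range_succ_eq_map, List.foldl_cons, List.foldl_map]
    have hsucc : ∀ (z : Int) (k : Nat), z >>> ((Nat.succ k : Nat) : Int)
        = (z >>> (1 : Nat)) >>> ((k : Nat) : Int) := fun z k => by
      rw [Int.shiftRight_natCast_right, Int.shiftRight_natCast_right,
        Nat.succ_eq_add_one, shift_succ]
    simp only [hsucc]
    have h0 : ∀ z : Int, z >>> (((0 : Nat) : Nat) : Int) = z := fun z => by
      rw [Int.shiftRight_natCast_right, Int.shiftRight_eq_div_pow]; norm_num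
    rw [h0, h0]
    rw [show PySem.Int.band (PySem.Int.band x 1) (PySem.Int.band mask 1)
          = PySem.Int.mod (PySem.Int.band x mask) 2 by
        rw [PySem.Int.band_one, PySem.Int.band_one,
          band01 _ _ (mod2_01 x) (mod2_01 mask), ← band_mod_two]]
    rw [ih (x >>> (1 : Nat)) (mask >>> (1 : Nat)) _
      (bxor01 a _ ha (mod2_01 (PySem.Int.band x mask)))]
    set y := PySem.Int.band x mask with hy
    set K := PySem.Int.bitCount
      (PySem.Int.band (PySem.Int.band (x >>> (1 : Nat)) (mask >>> (1 : Nat))) (2 ^ n - 1)) with hK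
    have hMpos : (0 : Int) ≤ 2 ^ (n + 1) - 1 := by
      have : (0 : Int) < 2 ^ (n + 1) := by positivity
      omega
    have hv : 0 ≤ PySem.Int.band y ((2 : Int) ^ (n + 1) - 1) := by
      rw [PySem.Int.band_comm]; exact PySem.Int.band_nonneg_of_nonneg_left y hMpos
    have e1 : PySem.Int.mod (PySem.Int.band y ((2 : Int) ^ (n + 1) - 1)) 2 = PySem.Int.mod y 2 := by
      rw [band_mod_two, modMask, mul_one]
    have e2 : PySem.Int.floordiv (PySem.Int.band y ((2 : Int) ^ (n + 1) - 1)) 2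
        = PySem.Int.band (PySem.Int.band (x >>> (1 : Nat)) (mask >>> (1 : Nat))) (2 ^ n - 1) := by
      rw [band_div_two, divMask, hy, band_div_two x mask, ← shift_one, ← shift_one]
    have e3 : PySem.Int.bitCount (PySem.Int.band y ((2 : Int) ^ (n + 1) - 1))
        = (PySem.Int.mod y 2).toNat + K := by
      rw [bitCount_step hv, e1, e2, hK]
    rw [e3]
    rcases mod2_01 y with h | h
    · rw [h]
      simp [PySem.Int.bxor_zero]
    · rw [h]
      rcases ha with rfl | rfl <;> rcases Nat.mod_two_eq_zero_or_one K with hk | hk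
      · rw [hk, show ((1 : Int).toNat + K) % 2 = 1 by omega]; decide
      · rw [hk, show ((1 : Int).toNat + K) % 2 = 0 by omega]; decide
      · rw [hk, show ((1 : Int).toNat + K) % 2 = 1 by omega]; decide
      · rw [hk, show ((1 : Int).toNat + K) % 2 = 0 by omega]; decide

theorem popcountAux_eq (m : Nat) : ∀ acc : Nat, popcountAux m acc = acc + PySem.Int.bitCount (m : Int) := by
  induction m using Nat.strong_induction_on with
  | _ m ih =>
    intro acc
    rw [popcountAux]
    by_cases h : m = 0
    · subst h; simp [PySem.Int.bitCount_zero]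
    · rw [if_neg h, ih (m / 2) (Nat.div_lt_self (Nat.pos_of_ne_zero h) (by norm_num)) _]
      rw [PySem.Int.bitCount_natCast (Nat.pos_of_ne_zero h)]
      omega

-- ===== VERDICT (by name: the statement is the Claim_ definition above) =====
theorem compute_linear_expression_spec : Claim_equal_compute_linear_expression := by
  intro x mask bits _
  unfold Spec_compute_linear_expression compute_linear_expression compute_linear_expression_alt
  by_cases hb : bits ≤ 0
  · rw [if_pos hb]
    rw [show PySem.List.pyRange 0 bits = [] by simp [PySem.List.pyRange]; omega]
    rfl
  · rw [if_neg hb]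
    obtain ⟨n, rfl⟩ : ∃ n : Nat, bits = (n : Int) := ⟨bits.toNat, by omega⟩
    rw [PySem.List.pyRange_zero_natCast, List.foldl_map]
    simp only [Int.toNat_natCast]
    rw [master n x mask 0 (Or.inl rfl)]
    rw [PySem.Int.bxor_comm, PySem.Int.bxor_zero]
    rw [show ((1 <<< n : Nat) : Int) - 1 = 2 ^ n - 1 by
      rw [Nat.shiftLeft_eq, one_mul]; push_cast; ring]
    have hlow : (0 : Int) ≤ PySem.Int.band (PySem.Int.band x mask) (2 ^ n - 1) := by
      rw [PySem.Int.band_comm]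
      refine PySem.Int.band_nonneg_of_nonneg_left _ ?_
      have : (0 : Int) < 2 ^ n := by positivity
      omega
    rw [popcountAux_eq, Int.toNat_of_nonneg hlow]
    rw [PySem.Int.band_one, PySem.Int.mod_eq_emod_of_pos (by norm_num)]
    omega
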